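-- pv_equiv track=rewrite | github.com/AxelSchneewind/cpa | test_progs/even_odd_accumulate_safe.py | accumulate
-- ===== SOURCE A (Python) =====
-- def inc(x):
--     return x + 1
--
-- def accumulate(n, m):
--     i = 0
--     total = 0
--     while i < n:
--         j = 0
--         while j < m:
--             if (i + j) % 2 == 0:
--                 total += i * j
--             else:
--                 total += i + j
--             j = inc(j)
--         i = inc(i)
--     return total
-- ===== SOURCE B (Python) =====
-- def accumulate(n, m):
--     # Closed form: split sums by parity of i and j (O(1) arithmetic).
--     np, mp = max(n, 0), max(m, 0)
--     en, on = (np + 1) // 2, np // 2     # count of even / odd i in [0, n)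
--     em, om = (mp + 1) // 2, mp // 2
--     sen, son = en * (en - 1), on * on   # sum of even / odd i in [0, n)
--     sem, som = em * (em - 1), om * om
--     return sen * (sem + om) + en * som + son * (som + em) + on * sem
-- ===== Notes on version B (the rewrite author's own statement) =====
-- stated objective: faster
-- what changed: Replaced the O(n*m) nested while loops with an O(1) closed-form expression: counts and sums of even/odd indices in [0,n) and [0,m) combined by parity of i+j.
import Mathlib
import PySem

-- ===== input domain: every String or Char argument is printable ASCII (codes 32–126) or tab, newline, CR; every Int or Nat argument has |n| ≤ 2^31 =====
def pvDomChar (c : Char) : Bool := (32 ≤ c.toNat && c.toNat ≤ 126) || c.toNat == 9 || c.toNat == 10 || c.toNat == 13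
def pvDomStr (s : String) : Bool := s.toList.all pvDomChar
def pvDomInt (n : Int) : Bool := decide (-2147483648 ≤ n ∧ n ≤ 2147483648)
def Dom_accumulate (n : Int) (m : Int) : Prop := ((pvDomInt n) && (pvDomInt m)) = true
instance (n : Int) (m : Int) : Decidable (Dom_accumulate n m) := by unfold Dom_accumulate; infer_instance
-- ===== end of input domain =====

-- B replaces the O(n*m) double loop by a closed-form arithmetic expression splitting both sums by parity (objective: faster, asymptotic).

-- ===== PORT A =====
def inc (x : Int) : Int := x + 1

-- inner while loop of A: 'while j < m: …; j = inc(j)'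
def accInner (i : Int) (m : Int) (j : Int) (total : Int) : Int :=
  if _h : j < m then
    accInner i m (inc j)
      (if PySem.Int.mod (i + j) 2 = 0 then total + i * j else total + (i + j))
  else total
termination_by (m - j).toNat
decreasing_by simp [inc]; omega

-- outer while loop of A: 'while i < n: …; i = inc(i)'
def accOuter (n : Int) (m : Int) (i : Int) (total : Int) : Int :=
  if _h : i < n then accOuter n m (inc i) (accInner i m 0 total) else total
termination_by (n - i).toNat
decreasing_by simp [inc]; omega

def accumulate (n : Int) (m : Int) : Int := accOuter n m 0 0

-- ===== PORT B =====
def accumulate_alt (n : Int) (m : Int) : Int :=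
  let np := max n 0
  let mp := max m 0
  let en := PySem.Int.floordiv (np + 1) 2
  let on_ := PySem.Int.floordiv np 2
  let em := PySem.Int.floordiv (mp + 1) 2
  let om := PySem.Int.floordiv mp 2
  let sen := en * (en - 1)
  let son := on_ * on_
  let sem := em * (em - 1)
  let som := om * om
  sen * (sem + om) + en * som + son * (som + em) + on_ * sem

-- ===== PRECONDITION & SPEC =====
def Spec_accumulate (n : Int) (m : Int) (out : Int) : Prop := out = accumulate_alt n m
instance (n : Int) (m : Int) (out : Int) : Decidable (Spec_accumulate n m out) := by unfold Spec_accumulate; infer_instance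

-- ===== CLAIM (what is proved, stated in full; the proofs are below) =====
def Claim_equal_accumulate : Prop := ∀ (n : Int) (m : Int), Dom_accumulate n m → Spec_accumulate n m (accumulate n m)

-- ===== LEMMAS AND PROOFS =====

-- proof-side closed form of the INNER loop's contribution for row i with bound m
def Pin (i : Int) (m : Int) : Int :=
  let mp := max m 0
  let em := (mp + 1) / 2
  let om := mp / 2
  if i % 2 = 0 then i * (em * (em - 1)) + i * om + om * om
  else i * (om * om) + i * em + em * (em - 1)

-- proof-side closed form of the whole result, with the row bound as a parameter
def Pout (i : Int) (m : Int) : Int :=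
  let np := max i 0
  let en := (np + 1) / 2
  let on_ := np / 2
  let em := (max m 0 + 1) / 2
  let om := (max m 0) / 2
  en * (en - 1) * (em * (em - 1) + om) + en * (om * om) +
    on_ * on_ * (om * om + em) + on_ * (em * (em - 1))

lemma alt_eq_pout (n m : Int) : accumulate_alt n m = Pout n m := by
  simp only [accumulate_alt, Pout,
    PySem.Int.floordiv_eq_ediv_of_pos (by norm_num : (0:Int) < 2)]

lemma pin_nonpos (i m : Int) (h : m ≤ 0) : Pin i m = 0 := by
  have hm : max m 0 = 0 := by omega
  simp only [Pin, hm]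
  norm_num

lemma pout_nonpos (n m : Int) (h : n ≤ 0) : Pout n m = 0 := by
  have hn : max n 0 = 0 := by omega
  simp only [Pout, hn]
  norm_num

lemma pin_step (i j : Int) (hi : 0 ≤ i) (hj : 0 ≤ j) :
    Pin i (j + 1) = Pin i j + (if (i + j) % 2 = 0 then i * j else i + j) := by
  have hmax1 : max (j + 1) 0 = j + 1 := by omega
  have hmax2 : max j 0 = j := by omega
  rcases Int.emod_two_eq i with hi2 | hi2 <;>
    rcases Int.emod_two_eq j with hj2 | hj2
  · -- i even, j even
    obtain ⟨a, ha⟩ : ∃ a, i = 2 * a := ⟨i / 2, by omega⟩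
    obtain ⟨b, hb⟩ : ∃ b, j = 2 * b := ⟨j / 2, by omega⟩
    have hc : (i + j) % 2 = 0 := by omega
    have e1 : (j + 1 + 1) / 2 = b + 1 := by omega
    have e2 : (j + 1) / 2 = b := by omega
    have e3 : (j + 1) / 2 = b := by omega
    have e4 : j / 2 = b := by omega
    simp only [Pin, hmax1, hmax2, e1, e2, e4, hi2, hc, if_pos]
    subst ha hb; ring
  · -- i even, j odd
    obtain ⟨a, ha⟩ : ∃ a, i = 2 * a := ⟨i / 2, by omega⟩
    obtain ⟨b, hb⟩ : ∃ b, j = 2 * b + 1 := ⟨j / 2, by omega⟩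
    have hc : ¬ (i + j) % 2 = 0 := by omega
    have e1 : (j + 1 + 1) / 2 = b + 1 := by omega
    have e2 : (j + 1) / 2 = b + 1 := by omega
    have e4 : j / 2 = b := by omega
    simp only [Pin, hmax1, hmax2, e1, e2, e4, hi2, hc, if_pos, if_neg, not_false_iff]
    subst ha hb; ring
  · -- i odd, j even
    obtain ⟨a, ha⟩ : ∃ a, i = 2 * a + 1 := ⟨i / 2, by omega⟩
    obtain ⟨b, hb⟩ : ∃ b, j = 2 * b := ⟨j / 2, by omega⟩
    have hc : ¬ (i + j) % 2 = 0 := by omega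
    have hio : ¬ i % 2 = 0 := by omega
    have e1 : (j + 1 + 1) / 2 = b + 1 := by omega
    have e2 : (j + 1) / 2 = b := by omega
    have e4 : j / 2 = b := by omega
    simp only [Pin, hmax1, hmax2, e1, e2, e4, hio, hc, if_neg, not_false_iff]
    subst ha hb; ring
  · -- i odd, j odd
    obtain ⟨a, ha⟩ : ∃ a, i = 2 * a + 1 := ⟨i / 2, by omega⟩
    obtain ⟨b, hb⟩ : ∃ b, j = 2 * b + 1 := ⟨j / 2, by omega⟩
    have hc : (i + j) % 2 = 0 := by omega
    have hio : ¬ i % 2 = 0 := by omega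
    have e1 : (j + 1 + 1) / 2 = b + 1 := by omega
    have e2 : (j + 1) / 2 = b + 1 := by omega
    have e4 : j / 2 = b := by omega
    simp only [Pin, hmax1, hmax2, e1, e2, e4, hio, hc, if_pos, if_neg, not_false_iff]
    subst ha hb; ring

lemma pout_step (i m : Int) (hi : 0 ≤ i) :
    Pout (i + 1) m = Pout i m + Pin i m := by
  have hmax1 : max (i + 1) 0 = i + 1 := by omega
  have hmax2 : max i 0 = i := by omega
  rcases Int.emod_two_eq i with hi2 | hi2
  · obtain ⟨a, ha⟩ : ∃ a, i = 2 * a := ⟨i / 2, by omega⟩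
    have e1 : (i + 1 + 1) / 2 = a + 1 := by omega
    have e2 : (i + 1) / 2 = a := by omega
    have e4 : i / 2 = a := by omega
    simp only [Pout, Pin, hmax1, hmax2, e1, e2, e4, hi2, if_pos]
    subst ha; ring
  · obtain ⟨a, ha⟩ : ∃ a, i = 2 * a + 1 := ⟨i / 2, by omega⟩
    have hio : ¬ i % 2 = 0 := by omega
    have e1 : (i + 1 + 1) / 2 = a + 1 := by omega
    have e2 : (i + 1) / 2 = a + 1 := by omega
    have e4 : i / 2 = a := by omega
    simp only [Pout, Pin, hmax1, hmax2, e1, e2, e4, hio, if_neg, not_false_iff]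
    subst ha; ring

lemma inner_exit (i m j t : Int) (h : m ≤ j) : accInner i m j t = t := by
  rw [accInner, dif_neg (by omega)]

lemma inner_eq (i m : Int) (hi : 0 ≤ i) :
    ∀ (k : Nat) (j t : Int), 0 ≤ j → j ≤ m → (m - j).toNat = k →
      accInner i m j t = t + (Pin i m - Pin i j) := by
  intro k
  induction k with
  | zero =>
    intro j t h0 hjm hk
    have hjeq : j = m := by omega
    subst hjeq
    rw [inner_exit i j j t le_rfl]; ring
  | succ k ih =>
    intro j t h0 hjm hk
    have hjlt : j < m := by omega
    rw [accInner, dif_pos hjlt]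
    have hmod : PySem.Int.mod (i + j) 2 = (i + j) % 2 :=
      PySem.Int.mod_eq_emod_of_pos (by norm_num)
    rw [hmod]
    have hrec := ih (inc j) (if (i + j) % 2 = 0 then t + i * j else t + (i + j))
      (by simp [inc]; omega) (by simp [inc]; omega) (by simp [inc]; omega)
    simp only [inc] at hrec ⊢
    rw [hrec, pin_step i j hi h0]
    split_ifs <;> ring

lemma inner_full (i m t : Int) (hi : 0 ≤ i) : accInner i m 0 t = t + Pin i m := by
  by_cases hm : 0 ≤ m
  · rw [inner_eq i m hi (m - 0).toNat 0 t le_rfl hm rfl, pin_nonpos i 0 le_rfl]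
    ring
  · rw [inner_exit i m 0 t (by omega), pin_nonpos i m (by omega)]
    ring

lemma outer_exit (n m i t : Int) (h : n ≤ i) : accOuter n m i t = t := by
  rw [accOuter, dif_neg (by omega)]

lemma outer_eq (n m : Int) :
    ∀ (k : Nat) (i t : Int), 0 ≤ i → i ≤ n → (n - i).toNat = k →
      accOuter n m i t = t + (Pout n m - Pout i m) := by
  intro k
  induction k with
  | zero =>
    intro i t h0 hin hk
    have : i = n := by omega
    subst this
    rw [outer_exit i m i t le_rfl]; ring
  | succ k ih =>
    intro i t h0 hin hk
    have hlt : i < n := by omega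
    rw [accOuter, dif_pos hlt]
    have hrec := ih (inc i) (accInner i m 0 t)
      (by simp [inc]; omega) (by simp [inc]; omega) (by simp [inc]; omega)
    simp only [inc] at hrec ⊢
    rw [hrec, inner_full i m t h0, pout_step i m h0]
    ring

-- ===== VERDICT (by name: the statement is the Claim_ definition above) =====
theorem accumulate_spec : Claim_equal_accumulate := by
  intro n m _
  show accumulate n m = accumulate_alt n m
  rw [alt_eq_pout]
  unfold accumulate
  by_cases hn : 0 ≤ n
  · rw [outer_eq n m (n - 0).toNat 0 0 le_rfl hn rfl, pout_nonpos 0 m le_rfl]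
    ring
  · rw [outer_exit n m 0 0 (by omega), pout_nonpos n m (by omega)]
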